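-- pv_equiv track=rewrite | github.com/mab2400/Redactions | contours.py | isOverlapping
-- ===== SOURCE A (Python) =====
-- def isOverlapping(redactions):
--
--     final_redactions = []
--     if len(redactions) == 0:
--         return redactions
--     else:
--         for i in range(0, len(redactions)-1):
--             for j in range(i+1, len(redactions)):
--                 if (redactions[i][0] + 2 >= redactions[j][0] and redactions[j][0] >= redactions[i][0] - 2
--                     and redactions[i][1] + 2 >= redactions[j][1] and redactions[j][1] >= redactions[i][1] - 2
--                     and redactions[i][2] + 2 >= redactions[j][2] and redactions[j][2] >= redactions[i][2] - 2
--                     and redactions[i][2] + 2 >= redactions[j][2] and redactions[j][2] >= redactions[i][2] - 2):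
--                     final_redactions.append(redactions[i])
--
--     ret = [red for red in redactions if red not in final_redactions]
--
--     if len(final_redactions) == 0:
--         return redactions
--     else:
--         return ret
-- ===== SOURCE B (Python) =====
-- def isOverlapping(redactions):
--     # One backward pass with a hash set: 'near' contains (xj, yj, zj+dz) for every already-seen (later) redaction j
--     # and dz in [-2..2]; a redaction is close to a later one iff one of the 25
--     # (x+dx, y+dy, z) probes hits the set.  O(n) instead of A's O(n^2).
--     near = set()
--     flagged = set()
--     for red in reversed(redactions):
--         x, y, z = red[0], red[1], red[2]
--         if any((x + dx, y + dy, z) in near for dx in range(-2, 3) for dy in range(-2, 3)):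
--             flagged.add(tuple(red))
--         for dz in range(-2, 3):
--             near.add((x, y, z + dz))
--     return [red for red in redactions if tuple(red) not in flagged]
-- ===== Notes on version B (the rewrite author's own statement) =====
-- stated objective: faster
-- what changed: Replaced A's all-pairs double loop (plus a list-membership filter) with a single backward pass that keeps a hash set of z-expanded coordinate triples of already-seen later redactions (5 inserts + 25 probes per element) and a hash set of flagged values, then filters once.
-- outside the precondition, e.g. on isOverlapping([[0], [10]]): A returns [[0], [10]], B raises IndexError; on isOverlapping([[1, 2]]): A returns [[1, 2]], B raises IndexError
import Mathlib
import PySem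

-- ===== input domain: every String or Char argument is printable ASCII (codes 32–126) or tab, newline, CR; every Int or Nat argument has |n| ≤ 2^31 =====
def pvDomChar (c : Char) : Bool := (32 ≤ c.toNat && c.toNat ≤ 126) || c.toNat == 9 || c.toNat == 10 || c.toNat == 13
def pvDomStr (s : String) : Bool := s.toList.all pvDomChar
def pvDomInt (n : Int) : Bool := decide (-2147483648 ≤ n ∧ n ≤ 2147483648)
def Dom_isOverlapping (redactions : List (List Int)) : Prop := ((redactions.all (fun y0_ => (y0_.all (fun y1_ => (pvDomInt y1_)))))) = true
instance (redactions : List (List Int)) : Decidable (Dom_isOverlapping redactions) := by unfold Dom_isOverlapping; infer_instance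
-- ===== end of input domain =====

-- B replaces A's all-pairs scan with a single backward pass over a hash set of
-- z-expanded coordinate triples (equal return value; proved below).


-- ===== PORT A =====
-- red[k] (k = 0,1,2), in range under Pre_; default irrelevant there
def pvG (r : List Int) (k : Int) : Int := PySem.List.pyGetD r k 0

-- A's pair test, the eight comparisons in A's order (third pair duplicated as in the source)
def pvCloseA (ri rj : List Int) : Bool :=
  decide (pvG ri 0 + 2 ≥ pvG rj 0) && decide (pvG rj 0 ≥ pvG ri 0 - 2) &&
  decide (pvG ri 1 + 2 ≥ pvG rj 1) && decide (pvG rj 1 ≥ pvG ri 1 - 2) &&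
  decide (pvG ri 2 + 2 ≥ pvG rj 2) && decide (pvG rj 2 ≥ pvG ri 2 - 2) &&
  decide (pvG ri 2 + 2 ≥ pvG rj 2) && decide (pvG rj 2 ≥ pvG ri 2 - 2)

def isOverlapping (redactions : List (List Int)) : List (List Int) :=
  if redactions.length = 0 then redactions
  else
    let final : List (List Int) :=
      (PySem.List.pyRange 0 ((redactions.length : Int) - 1) 1).foldl (fun acc i =>
        (PySem.List.pyRange (i + 1) (redactions.length : Int) 1).foldl (fun acc j =>
          if pvCloseA (PySem.List.pyGetD redactions i []) (PySem.List.pyGetD redactions j [])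
          then acc ++ [PySem.List.pyGetD redactions i []] else acc) acc) []
    let ret := redactions.filter (fun red => !(final.contains red))
    if final.length = 0 then redactions else ret

-- ===== PORT B =====
-- Source B's loop body: probe the 25 offsets (x+dx, y+dy, z) in 'near', then add this
-- point's five z-expansions to 'near'
def pvStepB (st : PySem.Set (Int × Int × Int) × PySem.Set (List Int)) (red : List Int) :
    PySem.Set (Int × Int × Int) × PySem.Set (List Int) :=
  let x := PySem.List.pyGetD red 0 0   -- red[0]..red[2]; in range under Pre_
  let y := PySem.List.pyGetD red 1 0
  let z := PySem.List.pyGetD red 2 0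
  let hit := (PySem.List.pyRange (-2) 3 1).any (fun dx =>
    (PySem.List.pyRange (-2) 3 1).any (fun dy => st.1.contains (x + dx, y + dy, z)))
  let flagged := if hit then st.2.add red else st.2
  let near := (PySem.List.pyRange (-2) 3 1).foldl (fun s dz => s.add (x, y, z + dz)) st.1
  (near, flagged)

def isOverlapping_alt (redactions : List (List Int)) : List (List Int) :=
  let st := redactions.reverse.foldl pvStepB
    ((PySem.Set.empty : PySem.Set (Int × Int × Int)), (PySem.Set.empty : PySem.Set (List Int)))
  redactions.filter (fun red => !(st.2.contains red))

-- ===== PRECONDITION & SPEC =====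
-- Pre_ excludes redactions with fewer than 3 coordinates: Python B always reads red[0..2]
-- (IndexError there), while A's short-circuiting can let it return on such inputs.
def Pre_isOverlapping (redactions : List (List Int)) : Prop :=
  ∀ r ∈ redactions, 3 ≤ r.length
instance (redactions : List (List Int)) : Decidable (Pre_isOverlapping redactions) := by
  unfold Pre_isOverlapping; infer_instance
def pvWitness_isOverlapping : List (List Int) := [[0, 0, 0], [10, 10, 10]]

def Spec_isOverlapping (redactions : List (List Int)) (out : List (List Int)) : Prop := out = isOverlapping_alt redactions
instance (redactions : List (List Int)) (out : List (List Int)) : Decidable (Spec_isOverlapping redactions out) := by unfold Spec_isOverlapping; infer_instance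

-- ===== CLAIM (what is proved, stated in full; the proofs are below) =====
def Claim_equal_isOverlapping : Prop := ∀ (redactions : List (List Int)), Dom_isOverlapping redactions → Pre_isOverlapping redactions → Spec_isOverlapping redactions (isOverlapping redactions)

-- ===== LEMMAS AND PROOFS =====

-- the common characterisation: v is dropped iff rs splits as m₁ ++ v :: m₂ with a close u after it
def SpecFlag (rs : List (List Int)) (v : List Int) : Prop :=
  ∃ m₁ m₂, rs = m₁ ++ v :: m₂ ∧ ∃ u ∈ m₂, pvCloseA v u = true

-- the condition under which B's loop body flags v, given the running 'near' set s and the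
-- elements 'pre' already folded in
def HitFrom (s : PySem.Set (Int × Int × Int)) (pre : List (List Int)) (v : List Int) : Prop :=
  (∃ dx dy : Int, -2 ≤ dx ∧ dx ≤ 2 ∧ -2 ≤ dy ∧ dy ≤ 2 ∧ (pvG v 0 + dx, pvG v 1 + dy, pvG v 2) ∈ s)
  ∨ ∃ u ∈ pre, pvCloseA v u = true

lemma mem_stepB_near (st : PySem.Set (Int × Int × Int) × PySem.Set (List Int))
    (red : List Int) (t : Int × Int × Int) :
    t ∈ (pvStepB st red).1 ↔
      t ∈ st.1 ∨ ∃ dz : Int, -2 ≤ dz ∧ dz ≤ 2 ∧ t = (pvG red 0, pvG red 1, pvG red 2 + dz) := by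
  show t ∈ (PySem.List.pyRange (-2) 3 1).foldl
      (fun s dz => s.add (pvG red 0, pvG red 1, pvG red 2 + dz)) st.1 ↔ _
  rw [← PySem.Set.update_map_eq_foldl_add]
  simp only [PySem.Set.mem_update, List.mem_map, PySem.List.mem_pyRange_one]
  constructor
  · rintro (h | ⟨dz, ⟨h1, h2⟩, h3⟩)
    · exact Or.inl h
    · exact Or.inr ⟨dz, h1, by omega, h3.symm⟩
  · rintro (h | ⟨dz, h1, h2, h3⟩)
    · exact Or.inl h
    · exact Or.inr ⟨dz, ⟨h1, by omega⟩, h3.symm⟩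

lemma stepB_flagged (st : PySem.Set (Int × Int × Int) × PySem.Set (List Int))
    (red v : List Int) :
    v ∈ (pvStepB st red).2 ↔ v ∈ st.2 ∨ (HitFrom st.1 [] red ∧ v = red) := by
  show v ∈ (if (PySem.List.pyRange (-2) 3 1).any (fun dx =>
      (PySem.List.pyRange (-2) 3 1).any (fun dy =>
        st.1.contains (pvG red 0 + dx, pvG red 1 + dy, pvG red 2))) then st.2.add red else st.2) ↔ _
  have hh : ((PySem.List.pyRange (-2) 3 1).any (fun dx =>
      (PySem.List.pyRange (-2) 3 1).any (fun dy =>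
        st.1.contains (pvG red 0 + dx, pvG red 1 + dy, pvG red 2)))) = true ↔
      HitFrom st.1 [] red := by
    simp only [List.any_eq_true, PySem.List.mem_pyRange_one, PySem.Set.contains_iff,
      HitFrom, List.not_mem_nil, false_and, exists_false, or_false]
    constructor
    · rintro ⟨dx, ⟨h1, h2⟩, dy, ⟨h3, h4⟩, h5⟩
      exact ⟨dx, dy, h1, by omega, h3, by omega, h5⟩
    · rintro ⟨dx, dy, h1, h2, h3, h4, h5⟩
      exact ⟨dx, ⟨h1, by omega⟩, dy, ⟨h3, by omega⟩, h5⟩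
  by_cases h : HitFrom st.1 [] red
  · rw [if_pos (hh.mpr h), PySem.Set.mem_add]
    tauto
  · rw [if_neg (fun hb => h (hh.mp hb))]
    tauto

lemma HitFrom_step (st : PySem.Set (Int × Int × Int) × PySem.Set (List Int))
    (red : List Int) (pre : List (List Int)) (v : List Int) :
    HitFrom (pvStepB st red).1 pre v ↔ HitFrom st.1 (red :: pre) v := by
  have hclose : (∃ dx dy : Int, -2 ≤ dx ∧ dx ≤ 2 ∧ -2 ≤ dy ∧ dy ≤ 2 ∧
      ∃ dz : Int, -2 ≤ dz ∧ dz ≤ 2 ∧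
        (pvG v 0 + dx, pvG v 1 + dy, pvG v 2) = (pvG red 0, pvG red 1, pvG red 2 + dz)) ↔
      pvCloseA v red = true := by
    simp only [Prod.mk.injEq, pvCloseA, Bool.and_eq_true, decide_eq_true_eq]
    constructor
    · rintro ⟨dx, dy, h1, h2, h3, h4, dz, h5, h6, h7, h8, h9⟩
      refine ⟨⟨⟨⟨⟨⟨⟨by omega, by omega⟩, by omega⟩, by omega⟩, by omega⟩, by omega⟩, by omega⟩, by omega⟩
    · rintro ⟨⟨⟨⟨⟨⟨⟨h1, h2⟩, h3⟩, h4⟩, h5⟩, h6⟩, _⟩, _⟩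
      exact ⟨pvG red 0 - pvG v 0, pvG red 1 - pvG v 1, by omega, by omega, by omega, by omega,
        pvG v 2 - pvG red 2, by omega, by omega, by omega, by omega, by omega⟩
  unfold HitFrom
  constructor
  · rintro (⟨dx, dy, h1, h2, h3, h4, h5⟩ | ⟨u, hu, hc⟩)
    · rcases (mem_stepB_near st red _).mp h5 with h | ⟨dz, hz1, hz2, hz3⟩
      · exact Or.inl ⟨dx, dy, h1, h2, h3, h4, h⟩
      · exact Or.inr ⟨red, by simp, hclose.mp ⟨dx, dy, h1, h2, h3, h4, dz, hz1, hz2, hz3⟩⟩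
    · exact Or.inr ⟨u, List.mem_cons_of_mem _ hu, hc⟩
  · rintro (⟨dx, dy, h1, h2, h3, h4, h5⟩ | ⟨u, hu, hc⟩)
    · exact Or.inl ⟨dx, dy, h1, h2, h3, h4, (mem_stepB_near st red _).mpr (Or.inl h5)⟩
    · rcases List.mem_cons.mp hu with heq' | hu'
      · rw [heq'] at hc
        rcases hclose.mpr hc with ⟨dx, dy, h1, h2, h3, h4, dz, h5, h6, h7⟩
        exact Or.inl ⟨dx, dy, h1, h2, h3, h4, (mem_stepB_near st red _).mpr (Or.inr ⟨dz, h5, h6, h7⟩)⟩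
      · exact Or.inr ⟨u, hu', hc⟩

lemma mem_foldl_flagged (l : List (List Int)) :
    ∀ (st : PySem.Set (Int × Int × Int) × PySem.Set (List Int)) (v : List Int),
    v ∈ (l.foldl pvStepB st).2 ↔
      v ∈ st.2 ∨ ∃ l₁ l₂, l = l₁ ++ v :: l₂ ∧ HitFrom st.1 l₁ v := by
  induction l with
  | nil => intro st v; simp
  | cons red l ih =>
    intro st v
    rw [List.foldl_cons, ih, stepB_flagged]
    constructor
    · rintro ((h | ⟨hf, rfl⟩) | ⟨l₁, l₂, heq, hf⟩)
      · exact Or.inl h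
      · exact Or.inr ⟨[], l, rfl, hf⟩
      · exact Or.inr ⟨red :: l₁, l₂, by rw [heq]; rfl, (HitFrom_step st red l₁ v).mp hf⟩
    · rintro (h | ⟨l₁, l₂, heq, hf⟩)
      · exact Or.inl (Or.inl h)
      · cases l₁ with
        | nil =>
          simp only [List.nil_append, List.cons.injEq] at heq
          exact Or.inl (Or.inr ⟨heq.1 ▸ hf, heq.1.symm⟩)
        | cons a l₁' =>
          simp only [List.cons_append, List.cons.injEq] at heq
          exact Or.inr ⟨l₁', l₂, heq.2, (HitFrom_step st red l₁' v).mpr (heq.1 ▸ hf)⟩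

lemma memB (rs : List (List Int)) (v : List Int) :
    v ∈ (rs.reverse.foldl pvStepB
      ((PySem.Set.empty : PySem.Set (Int × Int × Int)),
       (PySem.Set.empty : PySem.Set (List Int)))).2 ↔ SpecFlag rs v := by
  rw [mem_foldl_flagged]
  have hempty : ∀ t : Int × Int × Int, t ∉ (PySem.Set.empty : PySem.Set (Int × Int × Int)) := by
    intro t h; exact (List.not_mem_nil) h
  constructor
  · rintro (h | ⟨l₁, l₂, heq, hf⟩)
    · exact absurd h (List.not_mem_nil)
    · rcases hf with ⟨dx, dy, _, _, _, _, h⟩ | ⟨u, hu, hc⟩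
      · exact absurd h (hempty _)
      · refine ⟨l₂.reverse, l₁.reverse, ?_, u, List.mem_reverse.mpr hu, hc⟩
        have := congrArg List.reverse heq
        simpa using this
  · rintro ⟨m₁, m₂, heq, u, hu, hc⟩
    refine Or.inr ⟨m₂.reverse, m₁.reverse, ?_, Or.inr ⟨u, List.mem_reverse.mpr hu, hc⟩⟩
    rw [heq]; simp

-- A's accumulated final_redactions list, named so its characterisation can be stated
def pvFinalA (rs : List (List Int)) : List (List Int) :=
  (PySem.List.pyRange 0 ((rs.length : Int) - 1) 1).foldl (fun acc i =>
    (PySem.List.pyRange (i + 1) (rs.length : Int) 1).foldl (fun acc j =>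
      if pvCloseA (PySem.List.pyGetD rs i []) (PySem.List.pyGetD rs j [])
      then acc ++ [PySem.List.pyGetD rs i []] else acc) acc) []

lemma memA (rs : List (List Int)) (v : List Int) :
    v ∈ pvFinalA rs ↔ SpecFlag rs v := by
  unfold pvFinalA
  rw [PySem.List.foldl_congr_mem _ _
    (fun acc i => acc ++ ((PySem.List.pyRange (i + 1) (rs.length : Int) 1).filter
        (fun j => pvCloseA (PySem.List.pyGetD rs i []) (PySem.List.pyGetD rs j []))).map
        (fun _ => PySem.List.pyGetD rs i [])) _
    (fun acc i _ => PySem.List.foldl_append_if _ _ _ _)]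
  rw [PySem.List.foldl_append_eq_flatMap]
  simp only [List.nil_append, List.mem_flatMap, List.mem_map, List.mem_filter,
    PySem.List.mem_pyRange_one]
  constructor
  · rintro ⟨i, ⟨hi0, hi1⟩, j, ⟨⟨hj0, hj1⟩, hc⟩, hv⟩
    have hiN : i.toNat < rs.length := by omega
    have hjN : j.toNat < rs.length := by omega
    have hRi : PySem.List.pyGetD rs i [] = rs[i.toNat] := by
      rw [PySem.List.pyGetD_of_nonneg _ _ hi0, List.getD_eq_getElem _ _ hiN]
    have hRj : PySem.List.pyGetD rs j [] = rs[j.toNat] := by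
      rw [PySem.List.pyGetD_of_nonneg _ _ (by omega), List.getD_eq_getElem _ _ hjN]
    refine ⟨rs.take i.toNat, rs.drop (i.toNat + 1), ?_, rs[j.toNat], ?_, ?_⟩
    · rw [← hv, hRi]
      conv_lhs => rw [← List.take_append_drop i.toNat rs]
      rw [← List.getElem_cons_drop hiN]
    · have hidx : j.toNat - (i.toNat + 1) < (rs.drop (i.toNat + 1)).length := by
        simp [List.length_drop]; omega
      have : (rs.drop (i.toNat + 1))[j.toNat - (i.toNat + 1)] = rs[j.toNat] := by
        rw [List.getElem_drop]
        congr 1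
        omega
      exact this ▸ List.getElem_mem hidx
    · rw [hv, hRj] at hc; exact hc
  · rintro ⟨m₁, m₂, heq, u, hu, hc⟩
    obtain ⟨k, hk, hku⟩ := List.mem_iff_getElem.mp hu
    have hlen : rs.length = m₁.length + 1 + m₂.length := by
      rw [heq]; simp; omega
    have hRi : PySem.List.pyGetD rs (m₁.length : Int) [] = v := by
      rw [PySem.List.pyGetD_natCast, heq, List.getD_eq_getElem?_getD,
        List.getElem?_append_right (le_refl _)]
      simp
    have hRj : PySem.List.pyGetD rs ((m₁.length + 1 + k : Nat) : Int) [] = u := by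
      rw [PySem.List.pyGetD_natCast, heq, List.getD_eq_getElem?_getD,
        List.getElem?_append_right (by omega),
        show m₁.length + 1 + k - m₁.length = k + 1 from by omega,
        List.getElem?_cons_succ, List.getElem?_eq_getElem hk]
      simpa using hku
    refine ⟨(m₁.length : Int), ?_, ((m₁.length + 1 + k : Nat) : Int), ?_, ?_⟩
    · constructor
      · omega
      · omega
    · refine ⟨⟨by push_cast; omega, by push_cast; omega⟩, ?_⟩
      rw [hRi, hRj]; exact hc
    · exact hRi

lemma AB_eq (rs : List (List Int)) : isOverlapping rs = isOverlapping_alt rs := by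
  by_cases h0 : rs.length = 0
  · rw [List.length_eq_zero_iff] at h0
    subst h0
    rfl
  · have hA : isOverlapping rs =
        (if (pvFinalA rs).length = 0 then rs
         else rs.filter (fun red => !((pvFinalA rs).contains red))) := by
      unfold isOverlapping pvFinalA
      rw [if_neg h0]
    have hB : isOverlapping_alt rs = rs.filter (fun red =>
        !((rs.reverse.foldl pvStepB
          ((PySem.Set.empty : PySem.Set (Int × Int × Int)),
           (PySem.Set.empty : PySem.Set (List Int)))).2.contains red)) := rfl
    have hpt : ∀ red : List Int,
        ((pvFinalA rs).contains red) =
        ((rs.reverse.foldl pvStepB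
          ((PySem.Set.empty : PySem.Set (Int × Int × Int)),
           (PySem.Set.empty : PySem.Set (List Int)))).2.contains red) := by
      intro red
      by_cases h : SpecFlag rs red
      · rw [List.contains_iff_mem.mpr ((memA rs red).mpr h),
          PySem.Set.contains_iff _ _ |>.mpr ((memB rs red).mpr h)]
      · rw [Bool.eq_iff_iff]
        simp only [List.contains_iff_mem, PySem.Set.contains_iff]
        rw [memA, memB]
    rw [hA, hB]
    by_cases hf : (pvFinalA rs).length = 0
    · rw [if_pos hf]
      rw [List.length_eq_zero_iff] at hf
      symm
      apply List.filter_eq_self.mpr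
      intro red _
      rw [← hpt red, hf]
      rfl
    · rw [if_neg hf]
      exact List.filter_congr (fun red _ => by rw [hpt red])

-- ===== VERDICT (by name: the statement is the Claim_ definition above) =====
theorem isOverlapping_spec : Claim_equal_isOverlapping := by
  intro rs _ _
  unfold Spec_isOverlapping
  exact AB_eq rs
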